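-- pv_equiv track=rewrite | github.com/hekticxox/wallet_tool | archive/smart_filter.py | analyze_address_patterns
-- ===== SOURCE A (Python) =====
-- from collections import defaultdict
--
-- def analyze_address_patterns(addresses):
--     """Analyze addresses to find the most promising patterns"""
--
--     # Count sources to identify most active wallets
--     source_counts = defaultdict(int)
--     wallet_types = defaultdict(int)
--
--     for addr in addresses:
--         source = addr.get('source', '')
--         source_counts[source] += 1
--
--         # Extract wallet type
--         if 'MetaMask' in source:
--             wallet_types['MetaMask'] += 1
--         elif 'Trust' in source:
--             wallet_types['Trust'] += 1
--         elif 'Phantom' in source: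
--             wallet_types['Phantom'] += 1
--         elif 'Coinbase' in source:
--             wallet_types['Coinbase'] += 1
--
--     return source_counts, wallet_types
-- ===== SOURCE B (Python) =====
-- from collections import defaultdict
--
-- def analyze_address_patterns(addresses):
--     """Analyze addresses to find the most promising patterns"""
--     sources = [addr.get('source', '') for addr in addresses]
--     distinct = list(dict.fromkeys(sources))
--
--     source_counts = defaultdict(int)
--     for s in distinct:
--         source_counts[s] = sources.count(s)
--
--     wallet_types = defaultdict(int)
--     for s in distinct:
--         for t in ('MetaMask', 'Trust', 'Phantom', 'Coinbase'):
--             if t in s: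
--                 wallet_types[t] += sources.count(s)
--                 break
--
--     return source_counts, wallet_types
-- ===== Notes on version B (the rewrite author's own statement) =====
-- stated objective: alternative
-- what changed: B first extracts the source list and its ordered deduplication, fills source_counts by list.count per distinct source, and classifies each distinct source once via a table loop over the four wallet names with break (weighted by that source's count), instead of A's single pass running an elif cascade per address.
import Mathlib
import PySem

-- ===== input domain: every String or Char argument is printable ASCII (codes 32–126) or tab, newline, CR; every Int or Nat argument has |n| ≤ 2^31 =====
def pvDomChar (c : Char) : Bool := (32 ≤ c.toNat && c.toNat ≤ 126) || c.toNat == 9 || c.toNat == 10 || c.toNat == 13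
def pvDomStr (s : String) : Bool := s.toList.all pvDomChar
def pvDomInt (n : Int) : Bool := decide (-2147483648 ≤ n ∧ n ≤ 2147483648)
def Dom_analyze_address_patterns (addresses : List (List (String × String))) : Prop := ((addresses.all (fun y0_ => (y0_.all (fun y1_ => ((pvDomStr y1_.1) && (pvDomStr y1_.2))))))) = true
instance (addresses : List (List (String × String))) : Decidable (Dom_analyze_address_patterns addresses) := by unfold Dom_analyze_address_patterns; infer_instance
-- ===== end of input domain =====

-- B replaces A's per-address elif cascade by: dedup the source list, fill source_counts via
-- list.count per distinct source, and classify each distinct source once against a table of the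
-- four wallet names, weighted by its count (alternative decomposition, same results).

-- ===== PORT A =====
-- the elif cascade of A, applied to one address's source (wallet_types[t] += 1)
def pvBumpType (w : PySem.Dict String Int) (source : String) : PySem.Dict String Int :=
  if PySem.Str.isIn "MetaMask" source then w.modify "MetaMask" 0 (· + 1)
  else if PySem.Str.isIn "Trust" source then w.modify "Trust" 0 (· + 1)
  else if PySem.Str.isIn "Phantom" source then w.modify "Phantom" 0 (· + 1)
  else if PySem.Str.isIn "Coinbase" source then w.modify "Coinbase" 0 (· + 1)
  else w

def analyze_address_patterns (addresses : List (List (String × String))) :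
    (List (String × Int)) × (List (String × Int)) :=
  let r := addresses.foldl
    (fun (st : PySem.Dict String Int × PySem.Dict String Int) addr =>
      let source := (PySem.Dict.mk addr).getD "source" ""
      (st.1.modify source 0 (· + 1), pvBumpType st.2 source))
    (PySem.Dict.empty, PySem.Dict.empty)
  (r.1.items, r.2.items)

-- ===== PORT B =====
-- the tuple ('MetaMask', 'Trust', 'Phantom', 'Coinbase') of Source B
def pvWalletTable : List String := ["MetaMask", "Trust", "Phantom", "Coinbase"]

def analyze_address_patterns_alt (addresses : List (List (String × String))) :
    (List (String × Int)) × (List (String × Int)) :=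
  let sources := addresses.map (fun addr => (PySem.Dict.mk addr).getD "source" "")
  let distinct := PySem.List.dedup sources
  let source_counts := distinct.foldl
    (fun (d : PySem.Dict String Int) s => d.insert s ((sources.count s : Int)))
    PySem.Dict.empty
  -- the inner 'for t in (…): if t in s: …; break' is find?-first-match over the table
  let wallet_types := distinct.foldl
    (fun (w : PySem.Dict String Int) s =>
      match pvWalletTable.find? (fun t => PySem.Str.isIn t s) with
      | some t => w.modify t 0 (· + (sources.count s : Int))
      | none => w)
    PySem.Dict.empty
  (source_counts.items, wallet_types.items)

-- ===== PRECONDITION & SPEC =====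
def Spec_analyze_address_patterns (addresses : List (List (String × String))) (out : (List (String × Int)) × (List (String × Int))) : Prop := out = analyze_address_patterns_alt addresses
instance (addresses : List (List (String × String))) (out : (List (String × Int)) × (List (String × Int))) : Decidable (Spec_analyze_address_patterns addresses out) := by unfold Spec_analyze_address_patterns; infer_instance

-- ===== CLAIM (what is proved, stated in full; the proofs are below) =====
def Claim_equal_analyze_address_patterns : Prop := ∀ (addresses : List (List (String × String))), Dom_analyze_address_patterns addresses → Spec_analyze_address_patterns addresses (analyze_address_patterns addresses)

-- ===== LEMMAS AND PROOFS =====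

-- which wallet-type key the cascade touches for a given source (none: no branch fires)
def pvClassify (s : String) : Option String :=
  if PySem.Str.isIn "MetaMask" s then some "MetaMask"
  else if PySem.Str.isIn "Trust" s then some "Trust"
  else if PySem.Str.isIn "Phantom" s then some "Phantom"
  else if PySem.Str.isIn "Coinbase" s then some "Coinbase"
  else none

def pvStep (w : PySem.Dict String Int) (s : String) (c : Int) : PySem.Dict String Int :=
  match pvClassify s with
  | some t => w.modify t 0 (· + c)
  | none => w

lemma pvFind_eq_classify (s : String) :
    pvWalletTable.find? (fun t => PySem.Str.isIn t s) = pvClassify s := by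
  unfold pvWalletTable pvClassify
  simp only [List.find?]
  split_ifs <;> simp_all

lemma pvBumpType_eq (w : PySem.Dict String Int) (s : String) :
    pvBumpType w s = pvStep w s 1 := by
  unfold pvBumpType pvStep pvClassify; split_ifs <;> rfl

lemma pvModify_eq_insert (d : PySem.Dict String Int) (k : String) (d0 : Int) (f : Int → Int) :
    d.modify k d0 f = d.insert k (f (d.getD k d0)) := rfl

-- pvKeyOk x w: whatever key the cascade on x touches is already present in w
def pvKeyOk (x : String) (w : PySem.Dict String Int) : Prop :=
  ∀ t, pvClassify x = some t → w.contains t = true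

lemma pvStep_step_self (w : PySem.Dict String Int) (s : String) (c e : Int) :
    pvStep (pvStep w s c) s e = pvStep w s (c + e) := by
  unfold pvStep
  cases pvClassify s with
  | none => rfl
  | some t =>
      simp only [pvModify_eq_insert, PySem.Dict.getD_insert_self, PySem.Dict.insert_insert_self,
        add_assoc]

lemma pvKeyOk_self (w : PySem.Dict String Int) (x : String) (c : Int) :
    pvKeyOk x (pvStep w x c) := by
  intro t ht
  unfold pvStep
  rw [ht]
  simp [pvModify_eq_insert]

lemma pvKeyOk_step (x s : String) (c : Int) (w : PySem.Dict String Int) (hk : pvKeyOk x w) :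
    pvKeyOk x (pvStep w s c) := by
  intro t ht
  unfold pvStep
  cases pvClassify s with
  | none => exact hk t ht
  | some t' => simp [pvModify_eq_insert, PySem.Dict.contains_insert, hk t ht]

lemma pvInsert_insert_comm (w : PySem.Dict String Int) {t t' : String} (a b : Int)
    (h : w.contains t = true) (hne : t ≠ t') :
    (w.insert t a).insert t' b = (w.insert t' b).insert t a := by
  have hbne : (t' == t) = false := by simp [Ne.symm hne]
  have hbne' : (t == t') = false := by simp [hne]
  apply PySem.Dict.ext
  by_cases h' : w.contains t' = true
  · rw [PySem.Dict.items_insert_of_contains _ _ (show (w.insert t a).contains t' = true by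
          simp [PySem.Dict.contains_insert, h']),
        PySem.Dict.items_insert_of_contains _ _ h,
        PySem.Dict.items_insert_of_contains _ _ (show (w.insert t' b).contains t = true by
          simp [PySem.Dict.contains_insert, h]),
        PySem.Dict.items_insert_of_contains _ _ h',
        List.map_map, List.map_map]
    apply List.map_congr_left
    intro p _
    by_cases hp : p.1 = t
    · simp [Function.comp, hp, hbne']
    · by_cases hp' : p.1 = t'
      · simp [Function.comp, hp', hbne]
      · simp [Function.comp, hp, hp']
  · have h'f : w.contains t' = false := by simpa using h'
    rw [PySem.Dict.items_insert_of_not_contains _ _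
          (show (w.insert t a).contains t' = false by
            simp [PySem.Dict.contains_insert, h'f, hbne]),
        PySem.Dict.items_insert_of_contains _ _ h,
        PySem.Dict.items_insert_of_contains _ _ (show (w.insert t' b).contains t = true by
          simp [PySem.Dict.contains_insert, h]),
        PySem.Dict.items_insert_of_not_contains _ _ h'f,
        List.map_append]
    simp
    intro hEq
    exact absurd hEq.symm hne

lemma pvStep_comm (w : PySem.Dict String Int) (x s : String) (e c : Int)
    (hk : pvKeyOk x w) :
    pvStep (pvStep w x e) s c = pvStep (pvStep w s c) x e := by
  unfold pvStep
  cases hcx : pvClassify x with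
  | none => cases pvClassify s <;> rfl
  | some t =>
      cases hcs : pvClassify s with
      | none => rfl
      | some t' =>
          by_cases hts : t = t'
          · subst hts
            simp only [pvModify_eq_insert, PySem.Dict.getD_insert_self,
              PySem.Dict.insert_insert_self]
            congr 1
            ring
          · have hct : w.contains t = true := hk t hcx
            simp only [pvModify_eq_insert]
            rw [PySem.Dict.getD_insert_of_ne _ _ _ (Ne.symm hts),
                PySem.Dict.getD_insert_of_ne _ _ _ hts]
            exact pvInsert_insert_comm w _ _ hct hts

lemma pvFoldl_step_comm (ps : List (String × Int)) (x : String) :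
    ∀ w : PySem.Dict String Int, pvKeyOk x w →
      ps.foldl (fun w p => pvStep w p.1 p.2) (pvStep w x 1)
        = pvStep (ps.foldl (fun w p => pvStep w p.1 p.2) w) x 1 := by
  induction ps with
  | nil => intro w _; rfl
  | cons p rest ih =>
      intro w hk
      simp only [List.foldl_cons]
      rw [pvStep_comm w x p.1 1 p.2 hk]
      exact ih (pvStep w p.1 p.2) (pvKeyOk_step x p.1 p.2 w hk)

lemma pvFoldl_bump (ps : List (String × Int)) (x : String) (c : Int) :
    ∀ w : PySem.Dict String Int, (ps.map Prod.fst).Nodup → (x, c) ∈ ps →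
      (ps.map (fun p => if p.1 == x then (x, c + 1) else p)).foldl
          (fun w p => pvStep w p.1 p.2) w
        = pvStep (ps.foldl (fun w p => pvStep w p.1 p.2) w) x 1 := by
  induction ps with
  | nil => intro w _ hmem; cases hmem
  | cons p rest ih =>
      intro w hnd hmem
      simp only [List.map_cons, List.nodup_cons] at hnd ⊢
      by_cases hp : p.1 = x
      · have hxr : x ∉ rest.map Prod.fst := by rw [← hp]; exact hnd.1
        have hpc : p = (x, c) := by
          rcases List.mem_cons.mp hmem with h | h
          · exact h.symm
          · exact absurd (List.mem_map_of_mem (f := Prod.fst) h) hxr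
        have hmapid : rest.map (fun p => if p.1 == x then (x, c + 1) else p) = rest := by
          conv_rhs => rw [← List.map_id rest]
          apply List.map_congr_left
          intro q hq
          have : q.1 ≠ x := fun hqx => hxr (hqx ▸ List.mem_map_of_mem hq)
          simp [this]
        rw [hpc, hmapid]
        simp only [List.foldl_cons, beq_self_eq_true, if_pos]
        rw [show pvStep w x (c + 1) = pvStep (pvStep w x c) x 1 from
          (pvStep_step_self w x c 1).symm]
        exact pvFoldl_step_comm rest x (pvStep w x c) (pvKeyOk_self w x c)
      · have hpb : (p.1 == x) = false := by simp [hp]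
        simp only [List.foldl_cons, hpb, if_neg, Bool.false_eq_true, not_false_eq_true]
        have hmem' : (x, c) ∈ rest := by
          rcases List.mem_cons.mp hmem with h | h
          · exact absurd (congrArg Prod.fst h.symm) hp
          · exact h
        exact ih (pvStep w p.1 p.2) hnd.2 hmem'

lemma pvCounter_fold (l : List String) :
    (PySem.Dict.counter l).items.foldl (fun w p => pvStep w p.1 p.2) PySem.Dict.empty
      = l.foldl (fun w s => pvStep w s 1) PySem.Dict.empty := by
  induction l using List.reverseRecOn with
  | nil => rfl
  | append_singleton l x ih =>
      rw [List.foldl_append]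
      have hc : PySem.Dict.counter (l ++ [x])
          = (PySem.Dict.counter l).modify x 0 (· + 1) := by
        rw [PySem.Dict.counter_eq_foldl, PySem.Dict.counter_eq_foldl, List.foldl_append]
        rfl
      rw [hc]
      by_cases hx : (PySem.Dict.counter l).contains x = true
      · have hval : (PySem.Dict.counter l).getD x 0 = (l.count x : Int) :=
          PySem.Dict.getD_counter l x
        have hget : (PySem.Dict.counter l).get? x = some ((l.count x : Int)) := by
          cases hg : (PySem.Dict.counter l).get? x with
          | none =>
              have hcs := PySem.Dict.contains_eq_isSome_get? (PySem.Dict.counter l) x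
              rw [hg] at hcs
              rw [hcs] at hx
              simp at hx
          | some v =>
              have hD := PySem.Dict.getD_eq_get?_getD (PySem.Dict.counter l) x 0
              rw [hg, PySem.Dict.getD_counter] at hD
              simp at hD
              rw [hD]
        have hmem : (x, (l.count x : Int)) ∈ (PySem.Dict.counter l).items :=
          (PySem.Dict.get?_eq_some_iff_mem_items _ x _
            (PySem.Dict.nodup_keys_counter l)).mp hget
        have hitems : ((PySem.Dict.counter l).modify x 0 (· + 1)).items
            = (PySem.Dict.counter l).items.map
                (fun p => if p.1 == x then (x, (l.count x : Int) + 1) else p) := by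
          rw [pvModify_eq_insert, PySem.Dict.items_insert_of_contains _ _ hx, hval]
        rw [hitems,
            pvFoldl_bump _ x _ _ (PySem.Dict.nodup_keys_counter l) hmem, ih]
        rfl
      · have hxf : (PySem.Dict.counter l).contains x = false := by simpa using hx
        have hitems : ((PySem.Dict.counter l).modify x 0 (· + 1)).items
            = (PySem.Dict.counter l).items ++ [(x, 1)] := by
          rw [pvModify_eq_insert, PySem.Dict.items_insert_of_not_contains _ _ hxf,
              PySem.Dict.getD_of_not_contains _ _ hxf]
          norm_num
        rw [hitems, List.foldl_append, ih]
        rfl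

lemma pvPair_fold (l : List (List (String × String)))
    (d1 d2 : PySem.Dict String Int) :
    l.foldl
        (fun (st : PySem.Dict String Int × PySem.Dict String Int) addr =>
          let source := (PySem.Dict.mk addr).getD "source" ""
          (st.1.modify source 0 (· + 1), pvBumpType st.2 source))
        (d1, d2)
      = (l.foldl (fun d addr => d.modify ((PySem.Dict.mk addr).getD "source" "") 0 (· + 1)) d1,
         l.foldl (fun w addr => pvBumpType w ((PySem.Dict.mk addr).getD "source" "")) d2) := by
  induction l generalizing d1 d2 with
  | nil => rfl
  | cons a l ih => simpa only [List.foldl_cons] using ih _ _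

-- B's source_counts loop: inserting fresh keys in order appends, so its items are the map
lemma pvInsert_fold_items (f : String → Int) :
    ∀ (ds : List String) (d : PySem.Dict String Int), ds.Nodup →
      (∀ s ∈ ds, d.contains s = false) →
      (ds.foldl (fun (d : PySem.Dict String Int) s => d.insert s (f s)) d).items
        = d.items ++ ds.map (fun s => (s, f s)) := by
  intro ds
  induction ds with
  | nil => intro d _ _; simp
  | cons s rest ih =>
      intro d hnd hfresh
      simp only [List.foldl_cons, List.map_cons]
      rw [ih (d.insert s (f s)) (List.nodup_cons.mp hnd).2
          (fun s' hs' => by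
            have hne : (s' == s) = false := by
              have : s' ≠ s := fun h => (List.nodup_cons.mp hnd).1 (h ▸ hs')
              simp [this]
            simp [PySem.Dict.contains_insert, hne,
              hfresh s' (List.mem_cons_of_mem _ hs')]),
        PySem.Dict.items_insert_of_not_contains _ _ (hfresh s (List.mem_cons_self ..))]
      simp

-- ===== VERDICT (by name: the statement is the Claim_ definition above) =====
theorem analyze_address_patterns_spec : Claim_equal_analyze_address_patterns := by
  intro addresses _
  unfold Spec_analyze_address_patterns analyze_address_patterns analyze_address_patterns_alt
  simp only [pvPair_fold]
  have hsc : addresses.foldl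
      (fun (d : PySem.Dict String Int) addr =>
        d.modify ((PySem.Dict.mk addr).getD "source" "") 0 (· + 1)) PySem.Dict.empty
      = PySem.Dict.counter (addresses.map (fun addr => (PySem.Dict.mk addr).getD "source" "")) := by
    rw [PySem.Dict.counter_eq_foldl, List.foldl_map]
  set sources := addresses.map (fun addr => (PySem.Dict.mk addr).getD "source" "") with hsrc
  have hdedup : PySem.List.dedup sources = PySem.Set.ofList sources := PySem.List.dedup_eq_ofList sources
  have hndp : (PySem.Set.ofList sources).Nodup := PySem.Set.nodup_ofList sources
  refine Prod.ext ?_ ?_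
  · -- first components
    show (addresses.foldl _ PySem.Dict.empty).items = _
    rw [hsc, PySem.Dict.items_counter]
    rw [show ((PySem.List.dedup sources).foldl
          (fun (d : PySem.Dict String Int) s => d.insert s ((sources.count s : Int)))
          PySem.Dict.empty).items
        = (PySem.Set.ofList sources).map (fun s => (s, (sources.count s : Int))) from by
      rw [hdedup, pvInsert_fold_items _ _ _ hndp (fun _ _ => rfl)]
      rfl]
  · -- second components
    show (addresses.foldl _ PySem.Dict.empty).items = _
    refine congrArg PySem.Dict.items ?_
    have hB : (PySem.List.dedup sources).foldl
        (fun (w : PySem.Dict String Int) s =>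
          match pvWalletTable.find? (fun t => PySem.Str.isIn t s) with
          | some t => w.modify t 0 (· + (sources.count s : Int))
          | none => w)
        PySem.Dict.empty
        = (PySem.Set.ofList sources).foldl
            (fun w s => pvStep w s ((sources.count s : Int))) PySem.Dict.empty := by
      rw [hdedup]
      refine PySem.List.foldl_congr_mem _ _ _ _ (fun w s _ => ?_)
      rw [pvFind_eq_classify]
      unfold pvStep
      cases pvClassify s <;> rfl
    rw [hB]
    have hA : addresses.foldl
        (fun (w : PySem.Dict String Int) addr =>
          pvBumpType w ((PySem.Dict.mk addr).getD "source" "")) PySem.Dict.empty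
        = sources.foldl (fun w s => pvStep w s 1) PySem.Dict.empty := by
      rw [hsrc, List.foldl_map]
      exact PySem.List.foldl_congr_mem _ _ _ _ (fun w a _ => by rw [pvBumpType_eq])
    rw [hA, ← pvCounter_fold]
    rw [PySem.Dict.items_counter, List.foldl_map]
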